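-- pv_equiv track=rewrite | github.com/Legal-AI-Benchmark-Italia/MERL-T | src/data/pdf_chunker/custom_tokenizer.py | _split_by_spaces
-- ===== SOURCE A (Python) =====
-- def _split_by_spaces(text, max_size):
--     """
--     Divide il testo negli spazi cercando di rispettare la dimensione massima.
--
--     Args:
--         text: Testo da dividere
--         max_size: Dimensione massima per parte
--
--     Returns:
--         Lista di parti
--     """
--     words = text.split()
--     result = []
--     current = ""
--
--     for word in words:
--         if len(current) + len(word) + 1 > max_size and current:
--             result.append(current.strip())
--             current = word
--         else:
--             if current:
--                 current += ' ' + word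
--             else:
--                 current = word
--
--     # Aggiungi l'ultima parte
--     if current:
--         result.append(current.strip())
--
--     # Se una parte è ancora troppo lunga, dividi brutalmente
--     final_result = []
--     for part in result:
--         if len(part) > max_size:
--             # Dividi in blocchi di testo di lunghezza fissa
--             for i in range(0, len(part), max_size):
--                 final_result.append(part[i:i+max_size])
--         else:
--             final_result.append(part)
--
--     return final_result
-- ===== SOURCE B (Python) =====
-- def _split_by_spaces(text, max_size):
--     """Two-pointer over the word list: each group's extent is computed
--     arithmetically from word lengths, then materialized once with join/slicing
--     (no incremental string building, no flush state, no second pass)."""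
--     words = text.split()
--     out = []
--     i = 0
--     while i < len(words):
--         n = len(words[i])
--         j = i + 1
--         while j < len(words) and n + 1 + len(words[j]) <= max_size:
--             n += 1 + len(words[j])
--             j += 1
--         group = ' '.join(words[i:j])
--         if n > max_size:
--             for k in range(0, n, max_size):
--                 out.append(group[k:k + max_size])
--         else:
--             out.append(group)
--         i = j
--     return out
-- ===== Notes on version B (the rewrite author's own statement) =====
-- stated objective: alternative
-- what changed: B drops A's word-by-word string accumulation with flush state and its separate second chunking pass: a two-pointer scan over the word list computes each group's extent purely arithmetically from word lengths, then materializes the group once with ' '.join and slices it immediately if over-long.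
import Mathlib
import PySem

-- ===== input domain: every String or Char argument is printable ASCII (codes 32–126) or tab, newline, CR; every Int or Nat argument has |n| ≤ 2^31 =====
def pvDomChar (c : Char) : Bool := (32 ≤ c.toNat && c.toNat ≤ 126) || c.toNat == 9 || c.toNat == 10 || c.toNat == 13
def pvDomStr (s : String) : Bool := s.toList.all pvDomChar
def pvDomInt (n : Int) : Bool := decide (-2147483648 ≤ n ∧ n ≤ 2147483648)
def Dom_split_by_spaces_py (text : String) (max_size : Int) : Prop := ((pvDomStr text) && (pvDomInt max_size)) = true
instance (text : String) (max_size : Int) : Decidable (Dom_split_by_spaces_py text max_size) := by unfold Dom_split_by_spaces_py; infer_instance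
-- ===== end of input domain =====

-- B replaces A's word-by-word string accumulation + second chunking pass by an
-- index two-pointer over the word list: each group's extent is computed
-- arithmetically from word lengths and materialized once (objective: alternative).

-- ===== PORT A =====
-- A's brutal-split inner loop: for i in range(0, len(part), max_size): append part[i:i+max_size]
def pvBrutalA (part : List Char) (max_size : Int) : List (List Char) :=
  (PySem.List.pyRange 0 (part.length : Int) max_size).foldl
    (fun acc i => acc ++ [PySem.Chars.slice part (some i) (some (i + max_size))]) []

-- A's word loop body: state (result, current)
def pvStepA (max_size : Int) (st : List (List Char) × List Char) (word : List Char) :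
    List (List Char) × List Char :=
  if ((st.2.length : Int) + (word.length : Int) + 1 > max_size) ∧ st.2 ≠ [] then
    (st.1 ++ [PySem.Chars.strip st.2], word)
  else if st.2 ≠ [] then (st.1, st.2 ++ ' ' :: word)
  else (st.1, word)

def split_by_spaces_py (text : String) (max_size : Int) : List String :=
  let words := PySem.Chars.split₀ text.toList
  let st := words.foldl (pvStepA max_size) ([], [])
  let result := if st.2 ≠ [] then st.1 ++ [PySem.Chars.strip st.2] else st.1
  (result.foldl (fun acc part =>
      if (part.length : Int) > max_size then acc ++ pvBrutalA part max_size
      else acc ++ [part]) []).map String.ofList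

-- ===== PORT B =====
-- B's inner while loop: advance j (here: consume words) while the next word fits,
-- tracking the running length n; returns (taken words, rest, final n)
def pvGrab (m : Int) : Int → List (List Char) → List (List Char) × List (List Char) × Int
  | n, [] => ([], [], n)
  | n, w :: t =>
    if n + 1 + (w.length : Int) ≤ m then
      let r := pvGrab m (n + 1 + (w.length : Int)) t
      (w :: r.1, r.2)
    else ([], w :: t, n)

-- needed for pvPack's termination
theorem pvGrab_rest_le (m : Int) : ∀ (n : Int) (t : List (List Char)),
    (pvGrab m n t).2.1.length ≤ t.length := by
  intro n t
  induction t generalizing n with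
  | nil => simp [pvGrab]
  | cons w t ih =>
    unfold pvGrab
    split_ifs with h
    · exact le_trans (ih _) (Nat.le_succ _)
    · exact le_refl _

-- B's outer while loop: one group per iteration, chunked if over-long
def pvPack (m : Int) : List (List Char) → List (List Char)
  | [] => []
  | w :: t =>
    let r := pvGrab m (w.length : Int) t
    let group := PySem.Chars.join [' '] (w :: r.1)
    (if r.2.2 > m then
       (PySem.List.pyRange 0 r.2.2 m).foldl
         (fun acc k => acc ++ [PySem.Chars.slice group (some k) (some (k + m))]) []
     else [group]) ++ pvPack m r.2.1
  termination_by ws => ws.length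
  decreasing_by
    exact Nat.lt_succ_of_le (pvGrab_rest_le m _ t)

def split_by_spaces_py_alt (text : String) (max_size : Int) : List String :=
  (pvPack max_size (PySem.Chars.split₀ text.toList)).map String.ofList

-- ===== PRECONDITION & SPEC =====
-- Pre_ excludes max_size = 0 on text containing at least one word: there Python A
-- raises ValueError (range step 0) — and so does B.
def Pre_split_by_spaces_py (text : String) (max_size : Int) : Prop :=
  max_size ≠ 0 ∨ text = "" ∨ PySem.Str.strIsspace text = true
instance (text : String) (max_size : Int) : Decidable (Pre_split_by_spaces_py text max_size) := by
  unfold Pre_split_by_spaces_py; infer_instance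

def pvWitness_split_by_spaces_py : String × Int := ("ciao mondo legale", 7)

def Spec_split_by_spaces_py (text : String) (max_size : Int) (out : List String) : Prop := out = split_by_spaces_py_alt text max_size
instance (text : String) (max_size : Int) (out : List String) : Decidable (Spec_split_by_spaces_py text max_size out) := by unfold Spec_split_by_spaces_py; infer_instance

-- ===== CLAIM (what is proved, stated in full; the proofs are below) =====
def Claim_equal_split_by_spaces_py : Prop := ∀ (text : String) (max_size : Int), Dom_split_by_spaces_py text max_size → Pre_split_by_spaces_py text max_size → Spec_split_by_spaces_py text max_size (split_by_spaces_py text max_size)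

-- ===== LEMMAS AND PROOFS =====

-- the per-part chunking both programs perform
def pvChunk (max_size : Int) (part : List Char) : List (List Char) :=
  if (part.length : Int) > max_size then
    (PySem.List.pyRange 0 (part.length : Int) max_size).map
      (fun i => PySem.Chars.slice part (some i) (some (i + max_size)))
  else [part]

-- words are nonempty and whitespace-free; current has non-space first and last char
def pvGoodWord (w : List Char) : Prop := w ≠ [] ∧ ∀ c ∈ w, PySem.Chars.isspace c = false
def pvGoodCur (cur : List Char) : Prop :=
  ∀ c, (cur.head? = some c ∨ cur.getLast? = some c) → PySem.Chars.isspace c = false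

theorem pvBrutalA_eq (m : Int) (part : List Char) :
    pvBrutalA part m =
      (PySem.List.pyRange 0 (part.length : Int) m).map
        (fun i => PySem.Chars.slice part (some i) (some (i + m))) := by
  unfold pvBrutalA
  simpa using PySem.List.foldl_append_singleton_eq_map _ _ ([] : List (List Char))

theorem pvFinalA_eq (m : Int) (res : List (List Char)) (init : List (List Char)) :
    res.foldl (fun acc part =>
        if (part.length : Int) > m then acc ++ pvBrutalA part m else acc ++ [part]) init
      = init ++ res.flatMap (pvChunk m) := by
  induction res generalizing init with
  | nil => simp
  | cons p t ih =>
    simp only [List.foldl_cons, List.flatMap_cons, ih]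
    by_cases h : (p.length : Int) > m
    · simp [h, pvChunk, pvBrutalA_eq]
    · simp [h, pvChunk]

theorem pvStrip_eq_self (cur : List Char) (h : pvGoodCur cur) :
    PySem.Chars.strip cur = cur := by
  cases cur with
  | nil => rfl
  | cons a t =>
    have ha : PySem.Chars.isspace a = false := h a (Or.inl rfl)
    have hl : PySem.Chars.lstrip (a :: t) = a :: t := by
      simp [PySem.Chars.lstrip, ha]
    unfold PySem.Chars.strip
    rw [hl]
    rcases hr : (a :: t).reverse with _ | ⟨b, r⟩
    · simp at hr
    · have hb : (a :: t).getLast? = some b := by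
        rw [← List.head?_reverse, hr]; rfl
      have hbs : PySem.Chars.isspace b = false := h b (Or.inr hb)
      unfold PySem.Chars.rstrip
      rw [hr]
      have hdw : List.dropWhile PySem.Chars.isspace (b :: r) = b :: r := by
        rw [List.dropWhile_cons]; simp [hbs]
      rw [hdw, ← hr, List.reverse_reverse]

theorem pvSplit₀_go_good (s : List Char) : ∀ (cur : List Char) (acc : List (List Char)),
    (∀ c ∈ cur, PySem.Chars.isspace c = false) → (∀ w ∈ acc, pvGoodWord w) →
    ∀ w ∈ PySem.Chars.split₀.go s cur acc, pvGoodWord w := by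
  induction s with
  | nil =>
    intro cur acc hcur hacc w hw
    unfold PySem.Chars.split₀.go at hw
    split_ifs at hw with h
    · exact hacc w (List.mem_reverse.mp hw)
    · rw [List.mem_reverse, List.mem_cons] at hw
      rcases hw with hw | hw
      · subst hw
        refine ⟨by simpa using (List.isEmpty_eq_false_iff.mp (by simpa using h)), ?_⟩
        intro c hc
        exact hcur c (List.mem_reverse.mp hc)
      · exact hacc w hw
  | cons c rest ih =>
    intro cur acc hcur hacc w hw
    unfold PySem.Chars.split₀.go at hw
    split_ifs at hw with h1 h2
    · exact ih [] acc (by simp) hacc w hw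
    · refine ih [] (cur.reverse :: acc) (by simp) ?_ w hw
      intro v hv
      rcases List.mem_cons.mp hv with hv | hv
      · subst hv
        refine ⟨by simpa using (List.isEmpty_eq_false_iff.mp (by simpa using h2)), ?_⟩
        intro d hd
        exact hcur d (List.mem_reverse.mp hd)
      · exact hacc v hv
    · refine ih (c :: cur) acc ?_ hacc w hw
      intro d hd
      rcases List.mem_cons.mp hd with hd | hd
      · subst hd; simpa using h1
      · exact hcur d hd

theorem pvSplit₀_good (s : List Char) : ∀ w ∈ PySem.Chars.split₀ s, pvGoodWord w :=
  pvSplit₀_go_good s [] [] (by simp) (by simp)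

theorem pvMem_of_getLast? {l : List Char} {c : Char} (h : l.getLast? = some c) : c ∈ l := by
  rw [← List.head?_reverse] at h
  exact List.mem_reverse.mp (List.mem_of_mem_head? h)

theorem pvGoodCur_of_word (w : List Char) (hw : pvGoodWord w) : pvGoodCur w := by
  intro c hc
  rcases hc with hc | hc
  · exact hw.2 c (List.mem_of_mem_head? hc)
  · exact hw.2 c (pvMem_of_getLast? hc)

theorem pvGoodCur_append (cur w : List Char) (hc : cur ≠ []) (hcur : pvGoodCur cur)
    (hw : pvGoodWord w) : pvGoodCur (cur ++ ' ' :: w) := by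
  intro c hcmem
  rcases hcmem with h | h
  · apply hcur c
    left
    rwa [List.head?_append_of_ne_nil _ hc] at h
  · apply hw.2 c
    rcases w with _ | ⟨x, xs⟩
    · exact absurd rfl hw.1
    · have hne : (x :: xs) ≠ [] := by simp
      rw [List.getLast?_append, List.getLast?_cons_cons,
        List.getLast?_eq_some_getLast hne, Option.some_or] at h
      rw [← Option.some.inj h]
      exact List.getLast_mem hne

-- ' '.join lemmas
theorem pvJoin_singleton (a : List Char) : PySem.Chars.join [' '] [a] = a := by
  simp [PySem.Chars.join, List.intercalate, List.intersperse]

theorem pvJoin_cons_cons (a b : List Char) (t : List (List Char)) :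
    PySem.Chars.join [' '] (a :: b :: t) = a ++ ' ' :: PySem.Chars.join [' '] (b :: t) := by
  simp [PySem.Chars.join, List.intercalate, List.intersperse]

theorem pvJoin_merge (a b : List Char) (t : List (List Char)) :
    PySem.Chars.join [' '] (a :: b :: t) = PySem.Chars.join [' '] ((a ++ ' ' :: b) :: t) := by
  cases t with
  | nil => rw [pvJoin_cons_cons, pvJoin_singleton, pvJoin_singleton]
  | cons x xs =>
    rw [pvJoin_cons_cons, pvJoin_cons_cons, pvJoin_cons_cons, List.append_assoc]
    rfl

-- the length counter n tracked by pvGrab is the length of the joined group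
theorem pvGrab_n (m : Int) : ∀ (t : List (List Char)) (n : Int) (cur : List Char),
    n = (cur.length : Int) →
    (pvGrab m n t).2.2 = ((PySem.Chars.join [' '] (cur :: (pvGrab m n t).1)).length : Int) := by
  intro t
  induction t with
  | nil =>
    intro n cur hn
    simp [pvGrab, hn]
  | cons w t ih =>
    intro n cur hn
    unfold pvGrab
    split_ifs with h
    · have hn' : n + 1 + (w.length : Int) = (((cur ++ ' ' :: w).length : Int)) := by
        simp [hn]; ring
      have := ih (n + 1 + (w.length : Int)) (cur ++ ' ' :: w) hn'
      simpa [pvJoin_merge] using this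
    · simp [hn]

-- pvPack unfolded through pvChunk
theorem pvPack_cons (m : Int) (w : List Char) (t : List (List Char)) :
    pvPack m (w :: t)
      = pvChunk m (PySem.Chars.join [' '] (w :: (pvGrab m (w.length : Int) t).1))
        ++ pvPack m (pvGrab m (w.length : Int) t).2.1 := by
  rw [pvPack]
  have hn := pvGrab_n m t (w.length : Int) w rfl
  rw [hn]
  unfold pvChunk
  split_ifs with h
  · rw [PySem.List.foldl_append_singleton_eq_map]
    simp
  · rfl

-- main invariant: A's fold-then-chunk from a nonempty good current equals
-- B's grab/pack continuation, and the current stays nonempty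
theorem pvMain (m : Int) : ∀ (t : List (List Char)), (∀ w ∈ t, pvGoodWord w) →
    ∀ (res : List (List Char)) (cur : List Char), pvGoodCur cur → cur ≠ [] →
    (((t.foldl (pvStepA m) (res, cur)).1
        ++ [PySem.Chars.strip (t.foldl (pvStepA m) (res, cur)).2]).flatMap (pvChunk m)
      = res.flatMap (pvChunk m)
        ++ pvChunk m (PySem.Chars.join [' '] (cur :: (pvGrab m (cur.length : Int) t).1))
        ++ pvPack m (pvGrab m (cur.length : Int) t).2.1)
    ∧ (t.foldl (pvStepA m) (res, cur)).2 ≠ [] := by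
  intro t
  induction t with
  | nil =>
    intro _ res cur hcur hne
    constructor
    · simp [pvGrab, pvStrip_eq_self cur hcur, pvPack]
    · exact hne
  | cons w t ih =>
    intro hg res cur hcur hne
    have hw : pvGoodWord w := hg w (by simp)
    have ht : ∀ v ∈ t, pvGoodWord v := fun v hv => hg v (by simp [hv])
    simp only [List.foldl_cons]
    by_cases h : ((cur.length : Int) + (w.length : Int) + 1 > m)
    · -- flush: A starts a new current with w; B's grab stops before w
      have hA : pvStepA m (res, cur) w = (res ++ [PySem.Chars.strip cur], w) := by
        simp [pvStepA, h, hne]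
      rw [hA, pvStrip_eq_self cur hcur]
      obtain ⟨heq, hcur'⟩ := ih ht (res ++ [cur]) w (pvGoodCur_of_word w hw) hw.1
      refine ⟨?_, hcur'⟩
      rw [heq]
      have hgrab : pvGrab m (cur.length : Int) (w :: t)
          = ([], w :: t, (cur.length : Int)) := by
        unfold pvGrab
        rw [if_neg (by omega)]
      rw [hgrab]
      simp [pvPack_cons]
    · -- fits: A appends w to current; B's grab takes w
      have hA : pvStepA m (res, cur) w = (res, cur ++ ' ' :: w) := by
        simp [pvStepA, h, hne]
      rw [hA]
      obtain ⟨heq, hcur'⟩ := ih ht res (cur ++ ' ' :: w)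
        (pvGoodCur_append cur w hne hcur hw) (by simp)
      refine ⟨?_, hcur'⟩
      rw [heq]
      have hgrab : pvGrab m (cur.length : Int) (w :: t)
          = ((w :: (pvGrab m ((cur.length : Int) + 1 + (w.length : Int)) t).1),
             (pvGrab m ((cur.length : Int) + 1 + (w.length : Int)) t).2) := by
        conv_lhs => rw [pvGrab]
        rw [if_pos (by omega)]
      have hlen : (((cur ++ ' ' :: w).length : Int))
          = (cur.length : Int) + 1 + (w.length : Int) := by
        push_cast [List.length_append, List.length_cons]
        ring
      rw [hgrab, hlen, pvJoin_merge]

-- ===== VERDICT (by name: the statement is the Claim_ definition above) =====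
theorem split_by_spaces_py_spec : Claim_equal_split_by_spaces_py := by
  unfold Claim_equal_split_by_spaces_py
  intro text m _ _
  unfold Spec_split_by_spaces_py split_by_spaces_py split_by_spaces_py_alt
  dsimp only
  rcases hws : PySem.Chars.split₀ text.toList with _ | ⟨w, t⟩
  · simp [pvPack]
  · have hgood : ∀ v ∈ w :: t, pvGoodWord v := by
      rw [← hws]; exact pvSplit₀_good text.toList
    have hw : pvGoodWord w := hgood w (by simp)
    have ht : ∀ v ∈ t, pvGoodWord v := fun v hv => hgood v (by simp [hv])
    have hstep : pvStepA m ([], []) w = ([], w) := by simp [pvStepA]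
    simp only [List.foldl_cons, hstep]
    obtain ⟨heq, hcur⟩ := pvMain m t ht [] w (pvGoodCur_of_word w hw) hw.1
    rw [if_pos hcur, pvFinalA_eq]
    simp only [List.flatMap_nil, List.nil_append] at heq ⊢
    rw [heq, ← pvPack_cons]
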